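-- pv_equiv track=rewrite | github.com/rhddnjs1974/Backjoon | 21~25diamond/0xxxx/9544.py | characteristic
-- ===== SOURCE A (Python) =====
-- def characteristic(bases, mod):
--     poly = [1]
--
--     for b in bases:
--         nb = (-b) % mod
--         new_poly = [0] * (len(poly) + 1)
--
--         i = 0
--         while i < len(poly):
--             new_poly[i] = (new_poly[i] + poly[i] * nb) % mod
--             new_poly[i + 1] = (new_poly[i + 1] + poly[i]) % mod
--             i += 1
--
--         poly = new_poly
--
--     k = len(bases)
--     coeffs = [0] * (k + 1)
--     t = 1
--     while t <= k:
--         coeffs[t] = poly[k - t]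
--         t += 1
--     return coeffs
-- ===== SOURCE B (Python) =====
-- def characteristic(bases, mod):
--     nbs = [(-b) % mod for b in bases]
--
--     def mul(p, q):
--         # convolution, each output coefficient reduced once
--         return [sum(p[i] * q[d - i] for i in range(len(p)) if 0 <= d - i < len(q)) % mod
--                 for d in range(len(p) + len(q) - 1)]
--
--     def prod(lo, hi):
--         # product of (x + nbs[i]) for lo <= i < hi, ascending coefficients
--         if hi - lo <= 1:
--             return [nbs[lo], 1]
--         mid = (lo + hi) // 2
--         return mul(prod(lo, mid), prod(mid, hi))
--
--     k = len(bases)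
--     poly = [1] if k == 0 else prod(0, k)
--     return [0] + [c % mod for c in reversed(poly[:-1])]
-- ===== Notes on version B (the rewrite author's own statement) =====
-- stated objective: alternative
-- what changed: B replaces A's incremental multiply-by-one-linear-factor loop (rebuilding the coefficient array and reducing mod after every addition) by a divide-and-conquer product of the linear factors using a direct-convolution polynomial multiply in which each convolution coefficient is one direct sum reduced once; the output is built by reversing a slice instead of an index-copy loop.
import Mathlib
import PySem

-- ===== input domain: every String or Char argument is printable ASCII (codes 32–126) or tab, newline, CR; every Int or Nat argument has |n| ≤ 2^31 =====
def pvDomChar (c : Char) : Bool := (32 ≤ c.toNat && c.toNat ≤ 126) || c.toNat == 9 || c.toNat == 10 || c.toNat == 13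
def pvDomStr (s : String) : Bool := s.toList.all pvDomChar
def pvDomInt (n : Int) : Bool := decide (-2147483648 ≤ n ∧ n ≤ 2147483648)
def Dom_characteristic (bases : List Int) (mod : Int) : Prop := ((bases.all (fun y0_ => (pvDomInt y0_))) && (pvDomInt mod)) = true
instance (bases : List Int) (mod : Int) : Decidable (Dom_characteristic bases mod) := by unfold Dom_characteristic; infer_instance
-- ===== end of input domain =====

-- B is an alternative (not faster) exact re-implementation: divide-and-conquer product of the
-- linear factors, each convolution coefficient computed as one direct sum and reduced once.

-- ===== PORT A =====
-- one iteration of the inner while loop of A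
def pvStepBody (mod nb : Int) (poly : List Int) (np : List Int) (i : Nat) : List Int :=
  let np1 := np.set i (PySem.Int.mod (np.getD i 0 + poly.getD i 0 * nb) mod)
  np1.set (i + 1) (PySem.Int.mod (np1.getD (i + 1) 0 + poly.getD i 0) mod)

-- the inner while loop of A: build new_poly from poly, one linear factor
def pvStepA (mod nb : Int) (poly : List Int) : List Int :=
  (List.range poly.length).foldl (pvStepBody mod nb poly) (List.replicate (poly.length + 1) 0)

def characteristic (bases : List Int) (mod : Int) : List Int :=
  let poly := bases.foldl (fun poly b => pvStepA mod (PySem.Int.mod (-b) mod) poly) [1]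
  let k := bases.length
  -- the final while loop: coeffs[t] = poly[k - t] for t = 1..k
  (List.range k).foldl (fun coeffs t => coeffs.set (t + 1) (poly.getD (k - (t + 1)) 0))
    (List.replicate (k + 1) 0)

-- ===== PORT B =====
-- convolution: coefficient d is a direct sum (comprehension with a guard), reduced once
def pvMulB (mod : Int) (p q : List Int) : List Int :=
  (List.range (p.length + q.length - 1)).map (fun d =>
    PySem.Int.mod (((List.range p.length).map (fun i =>
      if i ≤ d ∧ d - i < q.length then p.getD i 0 * q.getD (d - i) 0 else 0)).sum) mod)

-- product of (x + nbs[i]) for lo <= i < hi (only invoked with lo < hi)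
def pvProdB (mod : Int) (nbs : List Int) (lo hi : Nat) : List Int :=
  if hi - lo ≤ 1 then [nbs.getD lo 0, 1]
  else pvMulB mod (pvProdB mod nbs lo ((lo + hi) / 2)) (pvProdB mod nbs ((lo + hi) / 2) hi)
  termination_by hi - lo
  decreasing_by all_goals omega

def characteristic_alt (bases : List Int) (mod : Int) : List Int :=
  let nbs := bases.map (fun b => PySem.Int.mod (-b) mod)
  let k := bases.length
  let poly := if k = 0 then [1] else pvProdB mod nbs 0 k
  0 :: ((PySem.List.slice poly none (some (-1))).reverse.map (fun c => PySem.Int.mod c mod))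

-- ===== PRECONDITION & SPEC =====
-- A computes (-b) % mod, a ZeroDivisionError when mod = 0 and bases is nonempty; exactly those inputs are excluded.
def Pre_characteristic (bases : List Int) (mod : Int) : Prop := bases = [] ∨ mod ≠ 0
instance (bases : List Int) (mod : Int) : Decidable (Pre_characteristic bases mod) := by
  unfold Pre_characteristic; infer_instance

def pvWitness_characteristic : List Int × Int := ([2, 3], 5)

def Spec_characteristic (bases : List Int) (mod : Int) (out : List Int) : Prop := out = characteristic_alt bases mod
instance (bases : List Int) (mod : Int) (out : List Int) : Decidable (Spec_characteristic bases mod out) := by unfold Spec_characteristic; infer_instance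

-- ===== CLAIM (what is proved, stated in full; the proofs are below) =====
def Claim_equal_characteristic : Prop := ∀ (bases : List Int) (mod : Int), Dom_characteristic bases mod → Pre_characteristic bases mod → Spec_characteristic bases mod (characteristic bases mod)

-- ===== LEMMAS AND PROOFS =====

-- Python % (PySem.Int.mod) basics
theorem pv_pm_modeq (a m : Int) : Int.ModEq m (PySem.Int.mod a m) a := by
  rw [Int.modEq_iff_dvd]
  have h := PySem.Int.floordiv_mul_add_mod a m
  have h2 : a - PySem.Int.mod a m = PySem.Int.floordiv a m * m := by linarith
  rw [h2]
  exact dvd_mul_left m _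

theorem pv_pm_unique {m : Int} (hm : m ≠ 0) {a r : Int} (h : Int.ModEq m r a)
    (hb : (0 < m → 0 ≤ r ∧ r < m) ∧ (m < 0 → m < r ∧ r ≤ 0)) :
    PySem.Int.mod a m = r := by
  have h2 : Int.ModEq m (PySem.Int.mod a m) r := (pv_pm_modeq a m).trans h.symm
  rw [Int.modEq_iff_dvd] at h2
  obtain ⟨t, ht⟩ := h2
  have habs : |m * t| < |m| := by
    rcases lt_or_gt_of_ne hm with hneg | hpos
    · have hb1 := hb.2 hneg
      have hb2 := PySem.Int.mod_neg_bounds a hneg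
      rw [abs_of_neg hneg]
      exact abs_lt.mpr ⟨by linarith, by linarith⟩
    · have hb1 := hb.1 hpos
      have hb2 := PySem.Int.mod_nonneg a hpos
      have hb3 := PySem.Int.mod_lt a hpos
      rw [abs_of_pos hpos]
      exact abs_lt.mpr ⟨by linarith, by linarith⟩
  rw [abs_mul] at habs
  have ht1 : |t| < 1 := by
    refine Int.lt_of_mul_lt_mul_left ?_ (abs_nonneg m)
    simpa using habs
  have ht0 : t = 0 := Int.abs_lt_one_iff.mp ht1
  subst ht0
  linarith

theorem pv_pm_idem {m : Int} (hm : m ≠ 0) (a : Int) :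
    PySem.Int.mod (PySem.Int.mod a m) m = PySem.Int.mod a m := by
  refine pv_pm_unique hm (Int.ModEq.refl _) ⟨fun hp => ⟨PySem.Int.mod_nonneg a hp, PySem.Int.mod_lt a hp⟩,
    fun hn => ⟨(PySem.Int.mod_neg_bounds a hn).1, (PySem.Int.mod_neg_bounds a hn).2⟩⟩

theorem pv_pm_zero (m : Int) : PySem.Int.mod 0 m = 0 := by
  simp [PySem.Int.mod, Int.zero_fmod]

theorem pv_eq_of_reduced {m : Int} (hm : m ≠ 0) {x y : Int}
    (hx : PySem.Int.mod x m = x) (hy : PySem.Int.mod y m = y)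
    (h : Int.ModEq m x y) : x = y := by
  have hu : PySem.Int.mod y m = x := by
    refine pv_pm_unique hm h ?_
    refine ⟨fun hp => ?_, fun hn => ?_⟩
    · rw [← hx]; exact ⟨PySem.Int.mod_nonneg x hp, PySem.Int.mod_lt x hp⟩
    · rw [← hx]; exact ⟨(PySem.Int.mod_neg_bounds x hn).1, (PySem.Int.mod_neg_bounds x hn).2⟩
  exact hu.symm.trans hy

theorem pv_getD_map_range (f : ℕ → Int) (n d : ℕ) :
    ((List.range n).map f).getD d 0 = if d < n then f d else 0 := by
  by_cases h : d < n
  · rw [if_pos h, List.getD_eq_getElem _ _ (by simpa using h)]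
    simp
  · rw [if_neg h, List.getD_eq_default]
    simpa using Nat.le_of_not_lt h

theorem pv_sum_map_range (f : ℕ → Int) (n : ℕ) :
    ((List.range n).map f).sum = ∑ i ∈ Finset.range n, f i := by
  induction n with
  | zero => simp
  | succ n ih => rw [List.range_succ]; simp [Finset.sum_range_succ, ih]

theorem pv_getD_set (l : List Int) (i : ℕ) (v : Int) (d : ℕ) :
    (l.set i v).getD d 0 = if d = i ∧ i < l.length then v else l.getD d 0 := by
  rw [List.getD_eq_getElem?_getD, List.getElem?_set]
  by_cases h1 : i = d
  · subst h1
    by_cases h2 : i < l.length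
    · simp [h2]
    · simp [h2]
  · rw [if_neg h1, if_neg (fun hc => h1 hc.1.symm), List.getD_eq_getElem?_getD]

-- ===== B-side lemmas =====
theorem pv_modeq_sum (m : Int) (s : Finset ℕ) (f g : ℕ → Int)
    (h : ∀ i ∈ s, Int.ModEq m (f i) (g i)) :
    Int.ModEq m (∑ i ∈ s, f i) (∑ i ∈ s, g i) := by
  induction s using Finset.induction_on with
  | empty => simp
  | insert a s ha ih =>
    rw [Finset.sum_insert ha, Finset.sum_insert ha]
    exact (h a (Finset.mem_insert_self a s)).add
      (ih fun i hi => h i (Finset.mem_insert_of_mem hi))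

theorem pvMulB_length (mod : Int) (p q : List Int) :
    (pvMulB mod p q).length = p.length + q.length - 1 := by
  simp [pvMulB]

theorem pv_sum_conv_eq (p q : List Int) (d : ℕ) :
    ((List.range p.length).map (fun i =>
      if i ≤ d ∧ d - i < q.length then p.getD i 0 * q.getD (d - i) 0 else 0)).sum
      = ∑ i ∈ Finset.range (d + 1), p.getD i 0 * q.getD (d - i) 0 := by
  rw [pv_sum_map_range]
  have h1 : ∀ i ∈ Finset.range p.length,
      (if i ≤ d ∧ d - i < q.length then p.getD i 0 * q.getD (d - i) 0 else 0)
        = (if i ≤ d then p.getD i 0 * q.getD (d - i) 0 else 0) := by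
    intro i _
    by_cases ha : i ≤ d
    · by_cases hb : d - i < q.length
      · simp [ha, hb]
      · rw [if_pos ha, if_neg (fun hc => hb hc.2),
          List.getD_eq_default q 0 (Nat.le_of_not_lt hb), mul_zero]
    · simp [ha]
  rw [Finset.sum_congr rfl h1]
  have h2 : ∑ i ∈ Finset.range p.length, (if i ≤ d then p.getD i 0 * q.getD (d - i) 0 else 0)
      = ∑ i ∈ Finset.range (max p.length (d + 1)),
          (if i ≤ d then p.getD i 0 * q.getD (d - i) 0 else 0) := by
    refine Finset.sum_subset ?_ ?_
    · intro x hx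
      simp only [Finset.mem_range] at hx ⊢
      omega
    · intro i hi hni
      simp only [Finset.mem_range] at hi hni
      rw [List.getD_eq_default p 0 (by omega), zero_mul]
      simp
  have h3 : ∑ i ∈ Finset.range (max p.length (d + 1)),
          (if i ≤ d then p.getD i 0 * q.getD (d - i) 0 else 0)
      = ∑ i ∈ Finset.range (d + 1), (if i ≤ d then p.getD i 0 * q.getD (d - i) 0 else 0) := by
    refine (Finset.sum_subset ?_ ?_).symm
    · intro x hx
      simp only [Finset.mem_range] at hx ⊢
      omega
    · intro i hi hni
      simp only [Finset.mem_range] at hi hni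
      rw [if_neg (by omega)]
  rw [h2, h3]
  exact Finset.sum_congr rfl fun i hi => by
    simp only [Finset.mem_range] at hi
    rw [if_pos (by omega)]

theorem pvMulB_getD (mod : Int) (p q : List Int) (d : ℕ) :
    (pvMulB mod p q).getD d 0 =
      if d < p.length + q.length - 1 then
        PySem.Int.mod (∑ i ∈ Finset.range (d + 1), p.getD i 0 * q.getD (d - i) 0) mod
      else 0 := by
  rw [pvMulB, pv_getD_map_range]
  by_cases hd : d < p.length + q.length - 1
  · rw [if_pos hd, if_pos hd, pv_sum_conv_eq]
  · rw [if_neg hd, if_neg hd]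

theorem pvMulB_cong {mod : Int} (p q : List Int) (P Q : Polynomial ℤ)
    (hp : ∀ d : ℕ, Int.ModEq mod (p.getD d 0) (P.coeff d))
    (hq : ∀ d : ℕ, Int.ModEq mod (q.getD d 0) (Q.coeff d)) (d : ℕ) :
    Int.ModEq mod ((pvMulB mod p q).getD d 0) ((P * Q).coeff d) := by
  have hco : (P * Q).coeff d = ∑ i ∈ Finset.range (d + 1), P.coeff i * Q.coeff (d - i) := by
    rw [Polynomial.coeff_mul, Finset.Nat.sum_antidiagonal_eq_sum_range_succ_mk]
  have hsum : Int.ModEq mod (∑ i ∈ Finset.range (d + 1), p.getD i 0 * q.getD (d - i) 0)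
      (∑ i ∈ Finset.range (d + 1), P.coeff i * Q.coeff (d - i)) :=
    pv_modeq_sum mod _ _ _ fun i _ => (hp i).mul (hq (d - i))
  rw [pvMulB_getD, hco]
  by_cases hd : d < p.length + q.length - 1
  · rw [if_pos hd]
    exact (pv_pm_modeq _ _).trans hsum
  · rw [if_neg hd]
    have hz : ∑ i ∈ Finset.range (d + 1), p.getD i 0 * q.getD (d - i) 0 = 0 := by
      apply Finset.sum_eq_zero
      intro i hi
      simp only [Finset.mem_range] at hi
      by_cases hp2 : i < p.length
      · rw [List.getD_eq_default q 0 (by omega), mul_zero]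
      · rw [List.getD_eq_default p 0 (by omega), zero_mul]
    rw [← hz]
    exact hsum

theorem pvProdB_spec (mod : Int) (nbs : List Int) : ∀ (n lo hi : ℕ), hi - lo = n → lo < hi →
    (pvProdB mod nbs lo hi).length = hi - lo + 1 ∧
    ∀ d : ℕ, Int.ModEq mod ((pvProdB mod nbs lo hi).getD d 0)
      ((∏ i ∈ Finset.Ico lo hi, (Polynomial.X + Polynomial.C (nbs.getD i 0))).coeff d) := by
  intro n
  induction n using Nat.strong_induction_on with
  | _ n ih =>
    intro lo hi hn hlt
    rw [pvProdB]
    by_cases hb : hi - lo ≤ 1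
    · have hhi : hi = lo + 1 := by omega
      subst hhi
      rw [if_pos hb]
      refine ⟨by simp, fun d => ?_⟩
      rw [Finset.prod_Ico_succ_top (le_refl lo), Finset.Ico_self, Finset.prod_empty, one_mul]
      match d with
      | 0 =>
        rw [Polynomial.coeff_add, Polynomial.coeff_X_zero, Polynomial.coeff_C, if_pos rfl,
          zero_add, List.getD_cons_zero]
      | 1 =>
        rw [Polynomial.coeff_add, Polynomial.coeff_X_one, Polynomial.coeff_C,
          if_neg one_ne_zero, add_zero, List.getD_cons_succ, List.getD_cons_zero]
      | (e + 2) =>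
        rw [Polynomial.coeff_add, Polynomial.coeff_X, if_neg (by omega), Polynomial.coeff_C,
          if_neg (by omega), add_zero]
        simp
    · rw [if_neg hb]
      have h1 : lo < (lo + hi) / 2 := by omega
      have h2 : (lo + hi) / 2 < hi := by omega
      obtain ⟨len1, hc1⟩ := ih ((lo + hi) / 2 - lo) (by omega) lo ((lo + hi) / 2) rfl h1
      obtain ⟨len2, hc2⟩ := ih (hi - (lo + hi) / 2) (by omega) ((lo + hi) / 2) hi rfl h2
      refine ⟨?_, fun d => ?_⟩
      · rw [pvMulB_length, len1, len2]
        omega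
      · rw [← Finset.prod_Ico_consecutive _ (by omega : lo ≤ (lo + hi) / 2) (by omega : (lo + hi) / 2 ≤ hi)]
        exact pvMulB_cong _ _ _ _ hc1 hc2 d

theorem pv_prod_range_getD (l : List Int) (g : Int → Polynomial ℤ) :
    ∏ i ∈ Finset.range l.length, g (l.getD i 0) = (l.map g).prod := by
  induction l with
  | nil => simp
  | cons a l ih =>
    rw [List.length_cons, Finset.prod_range_succ']
    simp only [List.getD_cons_succ, List.getD_cons_zero, List.map_cons, List.prod_cons]
    rw [ih, mul_comm]

-- ===== A-side lemmas =====
def pvVal (mod nb : Int) (poly : List Int) (d : ℕ) : Int :=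
  if d = 0 then PySem.Int.mod (0 + poly.getD 0 0 * nb) mod
  else PySem.Int.mod (PySem.Int.mod (0 + poly.getD (d - 1) 0) mod + poly.getD d 0 * nb) mod

theorem pvStepA_fold (mod nb : Int) (poly : List Int) (m0 : ℕ) (hm0 : m0 ≤ poly.length) :
    ((List.range m0).foldl (pvStepBody mod nb poly) (List.replicate (poly.length + 1) 0)).length
      = poly.length + 1 ∧
    ∀ d : ℕ, ((List.range m0).foldl (pvStepBody mod nb poly)
        (List.replicate (poly.length + 1) 0)).getD d 0 =
      if d < m0 then pvVal mod nb poly d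
      else if d = m0 ∧ 1 ≤ m0 then PySem.Int.mod (0 + poly.getD (m0 - 1) 0) mod
      else 0 := by
  induction m0 with
  | zero =>
    refine ⟨by simp, fun d => ?_⟩
    simp only [List.range_zero, List.foldl_nil]
    rw [if_neg (by omega), if_neg (by omega)]
    rcases lt_or_ge d (poly.length + 1) with h | h
    · rw [List.getD_eq_getElem _ _ (by simpa using h)]
      simp
    · rw [List.getD_eq_default _ _ (by simpa using h)]
  | succ m ih =>
    obtain ⟨ihlen, ihval⟩ := ih (by omega)
    rw [List.range_succ, List.foldl_append, List.foldl_cons, List.foldl_nil]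
    set F := (List.range m).foldl (pvStepBody mod nb poly) (List.replicate (poly.length + 1) 0)
      with hF
    have hFm := ihval m
    rw [if_neg (by omega)] at hFm
    have hFm1 := ihval (m + 1)
    rw [if_neg (by omega), if_neg (by omega)] at hFm1
    refine ⟨?_, fun d => ?_⟩
    · simp only [pvStepBody, List.length_set]
      exact ihlen
    · simp only [pvStepBody]
      have hv2 : (F.set m (PySem.Int.mod (F.getD m 0 + poly.getD m 0 * nb) mod)).getD (m + 1) 0
          = 0 := by
        rw [pv_getD_set, if_neg (by omega), hFm1]
      rw [hv2, pv_getD_set, List.length_set, ihlen]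
      by_cases hd1 : d = m + 1
      · subst hd1
        rw [if_pos ⟨rfl, by omega⟩, if_neg (by omega), if_pos ⟨rfl, by omega⟩]
        simp
      · rw [if_neg (fun hc => hd1 hc.1), pv_getD_set, ihlen]
        by_cases hd2 : d = m
        · subst hd2
          rw [if_pos ⟨rfl, by omega⟩, hFm]
          by_cases hm1 : 1 ≤ d
          · rw [if_pos ⟨rfl, hm1⟩, if_pos (by omega)]
            unfold pvVal
            rw [if_neg (by omega)]
          · have hz : d = 0 := by omega
            subst hz
            rw [if_neg (by omega), if_pos (by omega)]
            unfold pvVal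
            rw [if_pos rfl]
        · rw [if_neg (fun hc => hd2 hc.1), ihval d]
          by_cases hd3 : d < m
          · rw [if_pos hd3, if_pos (by omega)]
          · rw [if_neg hd3, if_neg (by omega), if_neg (by omega), if_neg (by omega)]

theorem pvStepA_length (mod nb : Int) (poly : List Int) :
    (pvStepA mod nb poly).length = poly.length + 1 :=
  (pvStepA_fold mod nb poly poly.length le_rfl).1

theorem pvStepA_getD (mod nb : Int) (poly : List Int) (h1 : 1 ≤ poly.length) (d : ℕ) :
    (pvStepA mod nb poly).getD d 0 =
      if d < poly.length then pvVal mod nb poly d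
      else if d = poly.length then PySem.Int.mod (0 + poly.getD (poly.length - 1) 0) mod
      else 0 := by
  have h := (pvStepA_fold mod nb poly poly.length le_rfl).2 d
  rw [pvStepA]
  rw [h]
  by_cases h1' : d < poly.length
  · rw [if_pos h1', if_pos h1']
  · rw [if_neg h1', if_neg h1']
    by_cases h2 : d = poly.length
    · rw [if_pos ⟨h2, h1⟩, if_pos h2]
    · rw [if_neg (fun hc => h2 hc.1), if_neg h2]

theorem pv_coeff_linear_mul (nb : Int) (P : Polynomial ℤ) (d : ℕ) :
    ((Polynomial.X + Polynomial.C nb) * P).coeff d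
      = (if d = 0 then 0 else P.coeff (d - 1)) + nb * P.coeff d := by
  rw [add_mul, Polynomial.coeff_add, Polynomial.coeff_C_mul]
  cases d with
  | zero => rw [if_pos rfl, Polynomial.mul_coeff_zero, Polynomial.coeff_X_zero, zero_mul]
  | succ n => rw [if_neg (by omega), Polynomial.coeff_X_mul, Nat.add_sub_cancel]

theorem pvStepA_reduced {mod : Int} (hm : mod ≠ 0) (nb : Int) (poly : List Int)
    (h1 : 1 ≤ poly.length) (d : ℕ) :
    PySem.Int.mod ((pvStepA mod nb poly).getD d 0) mod = (pvStepA mod nb poly).getD d 0 := by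
  rw [pvStepA_getD mod nb poly h1 d]
  split_ifs with hc1 hc2
  · unfold pvVal
    split_ifs <;> exact pv_pm_idem hm _
  · exact pv_pm_idem hm _
  · exact pv_pm_zero mod

theorem pvStepA_cong {mod : Int} (nb : Int) (poly : List Int)
    (h1 : 1 ≤ poly.length) (P : Polynomial ℤ)
    (hc : ∀ d : ℕ, Int.ModEq mod (poly.getD d 0) (P.coeff d)) (d : ℕ) :
    Int.ModEq mod ((pvStepA mod nb poly).getD d 0)
      (((Polynomial.X + Polynomial.C nb) * P).coeff d) := by
  rw [pvStepA_getD mod nb poly h1 d, pv_coeff_linear_mul]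
  by_cases hd0 : d < poly.length
  · rw [if_pos hd0]
    unfold pvVal
    by_cases hz : d = 0
    · subst hz
      rw [if_pos rfl, if_pos rfl, zero_add, zero_add]
      refine (pv_pm_modeq _ _).trans ?_
      exact ((hc 0).mul_right nb).trans (by rw [mul_comm])
    · rw [if_neg hz, if_neg hz]
      refine (pv_pm_modeq _ _).trans (Int.ModEq.add ?_ ?_)
      · refine (pv_pm_modeq _ _).trans ?_
        rw [zero_add]
        exact hc (d - 1)
      · exact ((hc d).mul_right nb).trans (by rw [mul_comm])
  · rw [if_neg hd0]
    have hcd : Int.ModEq mod 0 (P.coeff d) := by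
      have h := hc d
      rwa [List.getD_eq_default poly 0 (by omega)] at h
    by_cases hde : d = poly.length
    · rw [if_pos hde, if_neg (by omega)]
      have hx : Int.ModEq mod (PySem.Int.mod (0 + poly.getD (poly.length - 1) 0) mod)
          (P.coeff (d - 1)) := by
        refine (pv_pm_modeq _ _).trans ?_
        rw [zero_add, hde]
        exact hc (poly.length - 1)
      have hy : Int.ModEq mod 0 (nb * P.coeff d) := by
        have := hcd.mul_left nb
        simpa using this
      have := hx.add hy
      simpa using this
    · rw [if_neg hde, if_neg (by omega)]
      have hx : Int.ModEq mod 0 (P.coeff (d - 1)) := by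
        have h := hc (d - 1)
        rwa [List.getD_eq_default poly 0 (by omega)] at h
      have hy : Int.ModEq mod 0 (nb * P.coeff d) := by
        have := hcd.mul_left nb
        simpa using this
      have := hx.add hy
      simpa using this

theorem pvFoldA_spec {mod : Int} (hm : mod ≠ 0) :
    ∀ (bs : List Int) (poly : List Int) (P : Polynomial ℤ),
    1 ≤ poly.length → (∀ d : ℕ, Int.ModEq mod (poly.getD d 0) (P.coeff d)) →
    (bs.foldl (fun poly b => pvStepA mod (PySem.Int.mod (-b) mod) poly) poly).length
        = poly.length + bs.length ∧
    (∀ d : ℕ, Int.ModEq mod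
      ((bs.foldl (fun poly b => pvStepA mod (PySem.Int.mod (-b) mod) poly) poly).getD d 0)
      ((P * (bs.map (fun b => Polynomial.X + Polynomial.C (PySem.Int.mod (-b) mod))).prod).coeff d)) ∧
    (bs ≠ [] → ∀ d : ℕ,
      PySem.Int.mod ((bs.foldl (fun poly b => pvStepA mod (PySem.Int.mod (-b) mod) poly) poly).getD d 0) mod
        = (bs.foldl (fun poly b => pvStepA mod (PySem.Int.mod (-b) mod) poly) poly).getD d 0) := by
  intro bs
  induction bs with
  | nil =>
    intro poly P h1 hc
    refine ⟨by simp, fun d => ?_, fun hne => absurd rfl hne⟩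
    simpa using hc d
  | cons b bs ih =>
    intro poly P h1 hc
    have h1' : 1 ≤ (pvStepA mod (PySem.Int.mod (-b) mod) poly).length := by
      rw [pvStepA_length]
      omega
    have hc' : ∀ d : ℕ, Int.ModEq mod ((pvStepA mod (PySem.Int.mod (-b) mod) poly).getD d 0)
        (((Polynomial.X + Polynomial.C (PySem.Int.mod (-b) mod)) * P).coeff d) :=
      pvStepA_cong (PySem.Int.mod (-b) mod) poly h1 P hc
    obtain ⟨ihlen, ihc, ihred⟩ := ih (pvStepA mod (PySem.Int.mod (-b) mod) poly)
      ((Polynomial.X + Polynomial.C (PySem.Int.mod (-b) mod)) * P) h1' hc'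
    have hfold : (b :: bs).foldl (fun poly b => pvStepA mod (PySem.Int.mod (-b) mod) poly) poly
        = bs.foldl (fun poly b => pvStepA mod (PySem.Int.mod (-b) mod) poly)
            (pvStepA mod (PySem.Int.mod (-b) mod) poly) := by
      simp
    refine ⟨?_, fun d => ?_, fun _ d => ?_⟩
    · rw [hfold, ihlen, pvStepA_length]
      simp
      omega
    · rw [hfold]
      have hprod : ((Polynomial.X + Polynomial.C (PySem.Int.mod (-b) mod)) * P)
            * (bs.map (fun b => Polynomial.X + Polynomial.C (PySem.Int.mod (-b) mod))).prod
          = P * ((b :: bs).map (fun b => Polynomial.X + Polynomial.C (PySem.Int.mod (-b) mod))).prod := by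
        rw [List.map_cons, List.prod_cons]
        ring
      rw [← hprod]
      exact ihc d
    · rw [hfold]
      rcases bs with _ | ⟨c, cs⟩
      · simp only [List.foldl_nil]
        exact pvStepA_reduced hm (PySem.Int.mod (-b) mod) poly h1 d
      · exact ihred (by simp) d

theorem pvFoldSet_spec (f : ℕ → Int) (k : ℕ) : ∀ (m0 : ℕ), m0 ≤ k →
    ((List.range m0).foldl (fun l t => l.set (t + 1) (f t)) (List.replicate (k + 1) 0)).length = k + 1 ∧
    ∀ j : ℕ, ((List.range m0).foldl (fun l t => l.set (t + 1) (f t)) (List.replicate (k + 1) 0)).getD j 0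
      = if 1 ≤ j ∧ j ≤ m0 then f (j - 1) else 0 := by
  intro m0
  induction m0 with
  | zero =>
    intro _
    refine ⟨by simp, fun j => ?_⟩
    simp only [List.range_zero, List.foldl_nil]
    rw [if_neg (by omega)]
    rcases lt_or_ge j (k + 1) with h | h
    · rw [List.getD_eq_getElem _ _ (by simpa using h)]
      simp
    · rw [List.getD_eq_default _ _ (by simpa using h)]
  | succ m ih =>
    intro hm0
    obtain ⟨ihlen, ihval⟩ := ih (by omega)
    rw [List.range_succ, List.foldl_append, List.foldl_cons, List.foldl_nil]
    refine ⟨by simpa using ihlen, fun j => ?_⟩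
    rw [pv_getD_set, ihlen, ihval j]
    by_cases hj1 : j = m + 1
    · subst hj1
      rw [if_pos ⟨rfl, by omega⟩, if_pos (by omega)]
      simp
    · rw [if_neg (fun hc => hj1 hc.1)]
      by_cases hj2 : 1 ≤ j ∧ j ≤ m
      · rw [if_pos hj2, if_pos (by omega)]
      · rw [if_neg hj2, if_neg (by omega)]

-- ===== VERDICT (by name: the statement is the Claim_ definition above) =====
theorem characteristic_spec : Claim_equal_characteristic := by
  intro bases mod hdom hpre
  show characteristic bases mod = characteristic_alt bases mod
  by_cases hnil : bases = []
  · subst hnil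
    simp [characteristic, characteristic_alt, PySem.List.slice_to_neg_one]
  · have hm : mod ≠ 0 := hpre.resolve_left hnil
    have hk1 : 1 ≤ bases.length := by
      cases bases with
      | nil => exact absurd rfl hnil
      | cons a l => simp
    -- A side: the incremental fold
    have hinit : ∀ d : ℕ, Int.ModEq mod (([1] : List Int).getD d 0) ((1 : Polynomial ℤ).coeff d) := by
      intro d
      cases d with
      | zero => simp [Polynomial.coeff_one]
      | succ n => simp [Polynomial.coeff_one]
    obtain ⟨hAlen, hAc, hAred⟩ := pvFoldA_spec hm bases [1] 1 (by simp) hinit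
    simp only [one_mul] at hAc
    set polyA := bases.foldl (fun poly b => pvStepA mod (PySem.Int.mod (-b) mod) poly) [1]
      with hpA
    -- B side: the divide-and-conquer product
    set nbs := bases.map (fun b => PySem.Int.mod (-b) mod) with hnbs
    have hnlen : nbs.length = bases.length := by simp [hnbs]
    obtain ⟨hBlen, hBc⟩ := pvProdB_spec mod nbs bases.length 0 bases.length (by omega) (by omega)
    set polyB := pvProdB mod nbs 0 bases.length with hpB
    have hQP : (∏ i ∈ Finset.Ico 0 bases.length, (Polynomial.X + Polynomial.C (nbs.getD i 0)))
        = (bases.map (fun b => Polynomial.X + Polynomial.C (PySem.Int.mod (-b) mod))).prod := by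
      rw [← Finset.range_eq_Ico, ← hnlen, pv_prod_range_getD nbs
        (fun v => Polynomial.X + Polynomial.C v), hnbs, List.map_map]
      rfl
    simp only [hQP] at hBc
    -- extraction loop on the A side
    obtain ⟨hElen, hEval⟩ := pvFoldSet_spec
      (fun t => polyA.getD (bases.length - (t + 1)) 0) bases.length bases.length le_rfl
    have hAeq : characteristic bases mod
        = (List.range bases.length).foldl
            (fun coeffs t => coeffs.set (t + 1) (polyA.getD (bases.length - (t + 1)) 0))
            (List.replicate (bases.length + 1) 0) := rfl
    have hBeq : characteristic_alt bases mod
        = 0 :: ((PySem.List.slice polyB none (some (-1))).reverse.map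
            (fun c => PySem.Int.mod c mod)) := by
      simp only [characteristic_alt]
      rw [if_neg (by omega)]
    rw [hAeq, hBeq, PySem.List.slice_to_neg_one]
    have hdl : polyB.dropLast.length = bases.length := by
      rw [List.length_dropLast, hBlen]
      omega
    apply List.ext_getElem
    · rw [hElen]
      simp
      omega
    · intro j hj1 hj2
      rw [← List.getD_eq_getElem _ 0 hj1, ← List.getD_eq_getElem _ 0 hj2, hEval j]
      cases j with
      | zero => rw [if_neg (by omega), List.getD_cons_zero]
      | succ t =>
        rw [hElen] at hj1
        have htk : t + 1 ≤ bases.length := by omega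
        rw [if_pos ⟨by omega, htk⟩, List.getD_cons_succ]
        simp only [Nat.add_sub_cancel]
        have htL : t < (polyB.dropLast.reverse.map (fun c => PySem.Int.mod c mod)).length := by
          simp
          omega
        rw [List.getD_eq_getElem _ 0 htL, List.getElem_map, List.getElem_reverse,
          List.getElem_dropLast]
        have hidx : polyB.dropLast.length - 1 - t = bases.length - (t + 1) := by omega
        have hidx2 : bases.length - (t + 1) < polyB.length := by
          rw [hBlen]
          omega
        simp only [hidx]
        rw [← List.getD_eq_getElem polyB 0 hidx2]
        refine pv_eq_of_reduced hm (hAred hnil _) (pv_pm_idem hm _) ?_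
        refine (hAc _).trans ?_
        exact ((pv_pm_modeq _ _).trans (hBc _)).symm
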